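-- pv_equiv track=rewrite | github.com/LeeYuuuan/Electrical-Impedance-Tomography- | FunctionSet.py | get_several_layers_point_count
-- ===== SOURCE A (Python) =====
-- def get_layer_point_count(layer_id: int) -> int:
--     """
--     get the count number of the points in its layer
--     获得第layer_number 层的节点总数
--     :param layer_id: which layer the point count of to return
--     :return: the point count of this layer
--     """
--     if layer_id == 0:
--         return 1
--     return 8 + 4 * (layer_id - 1)
--
-- def get_several_layers_point_count(layer_n, layer_m):
--     """
--     获得从第n+1层到第m层的节点总数
--     :param layer_n: 第n层的编号
--     :param layer_m: 第m层编号
--     :return: 节点总数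
--     """
--     count = 0
--     if layer_n >= layer_m:
--         return 0
--     elif layer_n < layer_m:
--         for ly in range(layer_n + 1, layer_m + 1):
--             count += get_layer_point_count(ly)
--
--     return count
-- ===== SOURCE B (Python) =====
-- def get_several_layers_point_count(layer_n, layer_m):
--     if layer_n >= layer_m:
--         return 0
--     a = layer_n + 1
--     k = layer_m - layer_n
--     total = 2 * (a + layer_m) * k + 4 * k
--     if a <= 0 <= layer_m:
--         total -= 3
--     return total
-- ===== Notes on version B (the rewrite author's own statement) =====
-- stated objective: faster
-- what changed: Replaced the per-layer loop summing get_layer_point_count with a closed-form arithmetic-series formula plus a constant correction when layer 0 lies inside the summed range.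
import Mathlib
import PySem

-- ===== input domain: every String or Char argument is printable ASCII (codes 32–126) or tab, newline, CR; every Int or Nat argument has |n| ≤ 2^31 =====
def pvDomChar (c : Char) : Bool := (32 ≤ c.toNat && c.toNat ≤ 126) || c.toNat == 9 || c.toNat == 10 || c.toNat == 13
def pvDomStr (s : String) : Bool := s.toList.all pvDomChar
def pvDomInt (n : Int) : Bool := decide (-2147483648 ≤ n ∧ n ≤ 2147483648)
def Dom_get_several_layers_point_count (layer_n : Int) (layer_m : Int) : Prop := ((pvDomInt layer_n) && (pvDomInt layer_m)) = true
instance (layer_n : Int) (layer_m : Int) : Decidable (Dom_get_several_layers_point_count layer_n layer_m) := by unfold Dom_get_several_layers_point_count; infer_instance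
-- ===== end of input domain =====

-- B replaces A's per-layer summation loop by a closed-form arithmetic-series formula (objective: faster).

-- ===== PORT A =====
def get_layer_point_count (layer_id : Int) : Int :=
  if layer_id = 0 then 1 else 8 + 4 * (layer_id - 1)

def get_several_layers_point_count (layer_n : Int) (layer_m : Int) : Int :=
  if layer_n ≥ layer_m then 0
  else if layer_n < layer_m then
    (PySem.List.pyRange (layer_n + 1) (layer_m + 1) 1).foldl
      (fun count ly => count + get_layer_point_count ly) 0
  else 0

-- ===== PORT B =====
def get_several_layers_point_count_alt (layer_n : Int) (layer_m : Int) : Int :=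
  if layer_n ≥ layer_m then 0
  else
    let a := layer_n + 1
    let k := layer_m - layer_n
    let total := 2 * (a + layer_m) * k + 4 * k
    if a ≤ 0 ∧ 0 ≤ layer_m then total - 3 else total

-- ===== PRECONDITION & SPEC =====
def Spec_get_several_layers_point_count (layer_n : Int) (layer_m : Int) (out : Int) : Prop := out = get_several_layers_point_count_alt layer_n layer_m
instance (layer_n : Int) (layer_m : Int) (out : Int) : Decidable (Spec_get_several_layers_point_count layer_n layer_m out) := by unfold Spec_get_several_layers_point_count; infer_instance

-- ===== CLAIM (what is proved, stated in full; the proofs are below) =====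
def Claim_equal_get_several_layers_point_count : Prop := ∀ (layer_n : Int) (layer_m : Int), Dom_get_several_layers_point_count layer_n layer_m → Spec_get_several_layers_point_count layer_n layer_m (get_several_layers_point_count layer_n layer_m)

-- ===== LEMMAS AND PROOFS =====

-- closed-form value of the sum of get_layer_point_count over [a, b)
def layerSum (a b : Int) : Int :=
  if a < b then
    2 * (a + b - 1) * (b - a) + 4 * (b - a) - (if a ≤ 0 ∧ 0 < b then 3 else 0)
  else 0

theorem layerSum_step (a b : Int) (h : a < b) :
    get_layer_point_count a + layerSum (a + 1) b = layerSum a b := by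
  unfold get_layer_point_count layerSum
  by_cases hb : a + 1 < b
  · split_ifs <;> first | ring1 | (subst_vars; ring1) | (exfalso; omega)
  · have hb1 : b = a + 1 := by omega
    subst hb1
    split_ifs <;> first | ring1 | (subst_vars; ring1) | (exfalso; omega)

theorem foldl_layerSum (k : Nat) : ∀ (a c : Int),
    (PySem.List.pyRange a (a + k) 1).foldl
      (fun count ly => count + get_layer_point_count ly) c = c + layerSum a (a + k) := by
  induction k with
  | zero =>
    intro a c
    rw [PySem.List.pyRange_one_eq_nil (by omega)]
    simp [layerSum]
  | succ k ih =>
    intro a c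
    rw [PySem.List.pyRange_one_cons (by omega : a < a + (k + 1 : Nat))]
    simp only [List.foldl_cons]
    have he : a + ((k + 1 : Nat) : Int) = (a + 1) + (k : Int) := by push_cast; ring
    rw [he, ih (a + 1) (c + get_layer_point_count a), add_assoc,
        layerSum_step a ((a + 1) + (k : Int)) (by omega)]

-- ===== VERDICT (by name: the statement is the Claim_ definition above) =====
theorem get_several_layers_point_count_spec : Claim_equal_get_several_layers_point_count := by
  unfold Claim_equal_get_several_layers_point_count Spec_get_several_layers_point_count
  intro n m _
  unfold get_several_layers_point_count get_several_layers_point_count_alt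
  by_cases h : n ≥ m
  · simp [h]
  · have hlt : n < m := by omega
    simp only [h, if_false, hlt, if_true]
    have hk : (n + 1) + ((m - n).toNat : Int) = m + 1 := by omega
    have hf := foldl_layerSum (m - n).toNat (n + 1) 0
    rw [hk] at hf
    rw [hf]
    unfold layerSum
    split_ifs <;> first | ring1 | (subst_vars; ring1) | (exfalso; omega)
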